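-- pv_equiv track=rewrite | github.com/sreehari-a-h/Ai_blog_writer | seo_ai_open1.py | _categorize_keywords
-- ===== SOURCE A (Python) =====
-- from typing import List, Dict, Optional, Any
--
-- def _categorize_keywords(keywords: List[str]) -> Dict[str, List[str]]:
--     """Categorize keywords by search intent and type"""
--     categories = {
--         "informational": [],
--         "commercial": [],
--         "navigational": [],
--         "transactional": [],
--         "long_tail": [],
--         "questions": []
--     }
--
--     for keyword in keywords:
--         kw_lower = keyword.lower()
--
--         # Question keywords
--         if any(q in kw_lower for q in ['how', 'what', 'why', 'when', 'where', 'which', 'who']):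
--             categories["questions"].append(keyword)
--         # Commercial intent
--         elif any(c in kw_lower for c in ['best', 'top', 'review', 'compare', 'vs', 'price', 'cost', 'cheap', 'affordable']):
--             categories["commercial"].append(keyword)
--         # Transactional
--         elif any(t in kw_lower for t in ['buy', 'purchase', 'order', 'deal', 'discount', 'sale']):
--             categories["transactional"].append(keyword)
--         # Long tail (4+ words)
--         elif len(keyword.split()) >= 4:
--             categories["long_tail"].append(keyword)
--         # Default to informational
--         else:
--             categories["informational"].append(keyword)
--
--     return {k: v for k, v in categories.items() if v}  # Remove empty categories
-- ===== SOURCE B (Python) =====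
-- from typing import List, Dict
--
-- _RULES = [
--     ("questions", ['how', 'what', 'why', 'when', 'where', 'which', 'who']),
--     ("commercial", ['best', 'top', 'review', 'compare', 'vs', 'price', 'cost', 'cheap', 'affordable']),
--     ("transactional", ['buy', 'purchase', 'order', 'deal', 'discount', 'sale']),
-- ]
--
-- _ORDER = ["informational", "commercial", "navigational", "transactional", "long_tail", "questions"]
--
--
-- def _classify(keyword: str) -> str:
--     kw = keyword.lower()
--     for cat, markers in _RULES:
--         if any(m in kw for m in markers):
--             return cat
--     if len(keyword.split()) >= 4:
--         return "long_tail"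
--     return "informational"
--
--
-- def _categorize_keywords(keywords: List[str]) -> Dict[str, List[str]]:
--     labels = [_classify(k) for k in keywords]
--     result = {}
--     for cat in _ORDER:
--         kws = [k for k, l in zip(keywords, labels) if l == cat]
--         if kws:
--             result[cat] = kws
--     return result
-- ===== Notes on version B (the rewrite author's own statement) =====
-- stated objective: idiomatic
-- what changed: Replaces the single-pass elif ladder with mutable per-category accumulators by a data-driven rules table: each keyword is mapped to a label by scanning an ordered (category, markers) list, then the result is assembled per category in the fixed order by filtering the labelled keywords.
import Mathlib
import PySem

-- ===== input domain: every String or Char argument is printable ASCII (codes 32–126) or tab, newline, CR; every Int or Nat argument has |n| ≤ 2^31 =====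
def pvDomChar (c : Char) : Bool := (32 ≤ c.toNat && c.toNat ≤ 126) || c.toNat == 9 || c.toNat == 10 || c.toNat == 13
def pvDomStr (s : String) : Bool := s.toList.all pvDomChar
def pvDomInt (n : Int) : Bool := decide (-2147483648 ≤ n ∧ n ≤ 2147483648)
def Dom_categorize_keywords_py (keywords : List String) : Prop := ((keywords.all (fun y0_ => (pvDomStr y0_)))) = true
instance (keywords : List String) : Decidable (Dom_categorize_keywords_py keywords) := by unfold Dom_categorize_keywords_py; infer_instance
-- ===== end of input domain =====

-- B replaces A's elif ladder with mutable per-category dict accumulators by a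
-- data-driven rules table: classify each keyword to a label, then assemble the
-- output per category in the fixed order (objective: idiomatic; same cost).


-- ===== PORT A =====
-- One loop iteration: the elif ladder, appending the keyword to one category list.
def pvCatStep (cats : PySem.Dict String (List String)) (keyword : String) :
    PySem.Dict String (List String) :=
  let kw_lower := PySem.Str.lower keyword
  if ["how", "what", "why", "when", "where", "which", "who"].any
      (fun q => PySem.Str.isIn q kw_lower) then
    cats.modify "questions" [] (· ++ [keyword])
  else if ["best", "top", "review", "compare", "vs", "price", "cost", "cheap", "affordable"].any
      (fun c => PySem.Str.isIn c kw_lower) then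
    cats.modify "commercial" [] (· ++ [keyword])
  else if ["buy", "purchase", "order", "deal", "discount", "sale"].any
      (fun t => PySem.Str.isIn t kw_lower) then
    cats.modify "transactional" [] (· ++ [keyword])
  else if 4 ≤ (PySem.Str.split₀ keyword).length then
    cats.modify "long_tail" [] (· ++ [keyword])
  else
    cats.modify "informational" [] (· ++ [keyword])

def categorize_keywords_py (keywords : List String) : List (String × List String) :=
  let categories : PySem.Dict String (List String) :=
    PySem.Dict.ofList
      [("informational", []), ("commercial", []), ("navigational", []),
       ("transactional", []), ("long_tail", []), ("questions", [])]
  let final := keywords.foldl pvCatStep categories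
  -- {k: v for k, v in categories.items() if v} : keys are already distinct,
  -- so the rebuilt dict is the filtered items list.
  final.items.filter (fun p => !p.2.isEmpty)

-- ===== PORT B =====
def pvRules : List (String × List String) :=
  [("questions", ["how", "what", "why", "when", "where", "which", "who"]),
   ("commercial", ["best", "top", "review", "compare", "vs", "price", "cost", "cheap", "affordable"]),
   ("transactional", ["buy", "purchase", "order", "deal", "discount", "sale"])]

def pvOrder : List String :=
  ["informational", "commercial", "navigational", "transactional", "long_tail", "questions"]

def pvClassify (keyword : String) : String :=
  let kw := PySem.Str.lower keyword
  match pvRules.find? (fun r => r.2.any (fun m => PySem.Str.isIn m kw)) with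
  | some r => r.1
  | none => if 4 ≤ (PySem.Str.split₀ keyword).length then "long_tail" else "informational"

def categorize_keywords_py_alt (keywords : List String) : List (String × List String) :=
  let labels := keywords.map pvClassify
  pvOrder.filterMap (fun cat =>
    let kws := ((keywords.zip labels).filter (fun p => p.2 == cat)).map (·.1)
    if kws.isEmpty then none else some (cat, kws))

-- ===== PRECONDITION & SPEC =====
def Spec_categorize_keywords_py (keywords : List String) (out : List (String × List String)) : Prop := out = categorize_keywords_py_alt keywords
instance (keywords : List String) (out : List (String × List String)) : Decidable (Spec_categorize_keywords_py keywords out) := by unfold Spec_categorize_keywords_py; infer_instance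

-- ===== CLAIM (what is proved, stated in full; the proofs are below) =====
def Claim_equal_categorize_keywords_py : Prop := ∀ (keywords : List String), Dom_categorize_keywords_py keywords → Spec_categorize_keywords_py keywords (categorize_keywords_py keywords)

-- ===== LEMMAS AND PROOFS =====

-- The table of per-category filtered keyword lists, in the fixed key order.
def pvTable (ks : List String) : PySem.Dict String (List String) :=
  PySem.Dict.mk (pvOrder.map (fun c => (c, ks.filter (fun k => pvClassify k == c))))

theorem pvCatStep_eq_modify (cats : PySem.Dict String (List String)) (k : String) :
    pvCatStep cats k = cats.modify (pvClassify k) [] (· ++ [k]) := by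
  simp only [pvCatStep, pvClassify, pvRules, List.find?_cons, List.find?_nil]
  split_ifs <;> simp_all only [Bool.not_eq_true]

theorem pvClassify_cases (k : String) :
    pvClassify k = "questions" ∨ pvClassify k = "commercial" ∨
    pvClassify k = "transactional" ∨ pvClassify k = "long_tail" ∨
    pvClassify k = "informational" := by
  simp only [pvClassify, pvRules, List.find?_cons, List.find?_nil]
  cases h1 : ["how", "what", "why", "when", "where", "which", "who"].any
      (fun m => PySem.Str.isIn m (PySem.Str.lower k)) <;>
  cases h2 : ["best", "top", "review", "compare", "vs", "price", "cost", "cheap", "affordable"].any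
      (fun m => PySem.Str.isIn m (PySem.Str.lower k)) <;>
  cases h3 : ["buy", "purchase", "order", "deal", "discount", "sale"].any
      (fun m => PySem.Str.isIn m (PySem.Str.lower k)) <;>
  simp only [*] <;> (try split_ifs) <;> simp

theorem pvTable_step (ks : List String) (k : String) :
    PySem.Dict.modify (pvTable ks) (pvClassify k) [] (· ++ [k]) = pvTable (ks ++ [k]) := by
  rcases pvClassify_cases k with h | h | h | h | h <;>
    simp [pvTable, pvOrder, PySem.Dict.modify, List.filter_append, h, List.filter_cons] <;> rfl

theorem pvFoldl_eq_table (ks : List String) :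
    ks.foldl pvCatStep (PySem.Dict.ofList
      [("informational", []), ("commercial", []), ("navigational", []),
       ("transactional", []), ("long_tail", []), ("questions", [])]) = pvTable ks := by
  induction ks using List.reverseRecOn with
  | nil => simp [pvTable, pvOrder, PySem.Dict.ofList]; rfl
  | append_singleton xs x ih =>
      rw [List.foldl_append, List.foldl_cons, List.foldl_nil, ih,
        pvCatStep_eq_modify, pvTable_step]

theorem pvZip_filter (ks : List String) (c : String) :
    ((ks.zip (ks.map pvClassify)).filter (fun p => p.2 == c)).map (·.1)
      = ks.filter (fun k => pvClassify k == c) := by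
  induction ks with
  | nil => rfl
  | cons x xs ih =>
      simp only [List.map_cons, List.zip_cons_cons, List.filter_cons]
      by_cases h : pvClassify x == c <;> simp [h, ih]

theorem pvFilter_eq_filterMap (l : List String) (f : String → List String) :
    ((l.map (fun c => (c, f c))).filter (fun p => !p.2.isEmpty))
      = l.filterMap (fun c => if (f c).isEmpty then none else some (c, f c)) := by
  induction l with
  | nil => rfl
  | cons x xs ih =>
      simp only [List.map_cons, List.filter_cons, List.filterMap_cons]
      by_cases h : (f x).isEmpty <;> simp [h, ih]

-- ===== VERDICT (by name: the statement is the Claim_ definition above) =====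
theorem categorize_keywords_py_spec : Claim_equal_categorize_keywords_py := by
  intro keywords _
  unfold Spec_categorize_keywords_py categorize_keywords_py categorize_keywords_py_alt
  simp only [pvFoldl_eq_table, pvZip_filter, pvTable]
  exact pvFilter_eq_filterMap pvOrder _
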